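-- pv_equiv track=rewrite | github.com/marcinwasowicz/AGH_Compilers | Matrix_Language_Project/c_code_generation/generator_utils.py | eye_to_diagonal
-- ===== SOURCE A (Python) =====
-- def eye_to_diagonal(eye, size):
--     idxs = set([i * size + i for i in range(size)])
--     zero_count = 0
--     eye = list(eye)
--     for char_idx, char in enumerate(eye):
--         if char == '0':
--             if zero_count in idxs:
--                 eye[char_idx] = '1'
--             zero_count += 1
--     return "".join(eye)
-- ===== SOURCE B (Python) =====
-- def eye_to_diagonal(eye, size):
--     chars = list(eye)
--     zeros = [i for i, ch in enumerate(chars) if ch == '0']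
--     for i in range(size):
--         ord_ = i * (size + 1)
--         if ord_ >= len(zeros):
--             break
--         chars[zeros[ord_]] = '1'
--     return "".join(chars)
-- ===== Notes on version B (the rewrite author's own statement) =====
-- stated objective: alternative
-- what changed: Instead of scanning every character while incrementing a zero counter and testing it against a precomputed set of diagonal ranks, B collects the string positions of all '0's in one pass and then walks only the diagonal ranks i*(size+1), writing '1' at zeros[i*(size+1)] and breaking at the first rank past the available zeros.
import Mathlib
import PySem

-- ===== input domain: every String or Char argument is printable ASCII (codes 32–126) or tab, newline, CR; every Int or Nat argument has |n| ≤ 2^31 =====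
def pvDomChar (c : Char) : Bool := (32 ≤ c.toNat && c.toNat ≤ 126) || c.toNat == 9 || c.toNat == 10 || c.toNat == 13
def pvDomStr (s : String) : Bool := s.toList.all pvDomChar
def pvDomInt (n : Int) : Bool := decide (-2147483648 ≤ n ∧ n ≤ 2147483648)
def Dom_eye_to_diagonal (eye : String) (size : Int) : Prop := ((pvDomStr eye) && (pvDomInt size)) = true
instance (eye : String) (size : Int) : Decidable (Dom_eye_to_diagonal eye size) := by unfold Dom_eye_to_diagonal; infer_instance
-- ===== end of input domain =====

-- B inverts A's traversal: one pass collects the positions of the '0's, then only the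
-- diagonal ranks i*(size+1) are visited (stopping at the first rank past the available
-- zeros) instead of scanning every character with a running zero counter.

-- ===== PORT A =====
def eye_to_diagonal (eye : String) (size : Int) : String :=
  let idxs : PySem.Set Int :=
    PySem.Set.ofList ((PySem.List.pyRange 0 size 1).map (fun i => i * size + i))
  let res :=
    (PySem.List.enumerate eye.toList 0).foldl
      (fun (st : List Char × Int) (p : Int × Char) =>
        if p.2 = '0' then
          ((if idxs.contains st.2 then PySem.List.pySetD st.1 p.1 '1' else st.1), st.2 + 1)
        else st)
      (eye.toList, (0 : Int))
  String.ofList res.1  -- "".join of the mutated char list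

-- ===== PORT B =====
-- the 'for i in range(size): … if ord_ >= len(zeros): break …' loop of Source B
def altMark (size : Int) (zeros : List Int) (chars : List Char) (i : Int) : List Char :=
  if _h : i < size then
    if (zeros.length : Int) ≤ i * (size + 1) then chars
    else
      altMark size zeros
        (PySem.List.pySetD chars (PySem.List.pyGetD zeros (i * (size + 1)) 0) '1') (i + 1)
  else chars
termination_by (size - i).toNat
decreasing_by omega

def eye_to_diagonal_alt (eye : String) (size : Int) : String :=
  let chars := eye.toList
  let zeros := ((PySem.List.enumerate chars 0).filter (fun p => p.2 == '0')).map (fun p => p.1)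
  String.ofList (altMark size zeros chars 0)  -- "".join of the mutated char list

-- ===== PRECONDITION & SPEC =====
def Spec_eye_to_diagonal (eye : String) (size : Int) (out : String) : Prop := out = eye_to_diagonal_alt eye size
instance (eye : String) (size : Int) (out : String) : Decidable (Spec_eye_to_diagonal eye size out) := by unfold Spec_eye_to_diagonal; infer_instance

-- ===== CLAIM (what is proved, stated in full; the proofs are below) =====
def Claim_equal_eye_to_diagonal : Prop := ∀ (eye : String) (size : Int), Dom_eye_to_diagonal eye size → Spec_eye_to_diagonal eye size (eye_to_diagonal eye size)

-- ===== LEMMAS AND PROOFS =====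

-- A's scan, as a structural recursion: the c-th '0' (counting from the left) becomes '1'
-- exactly when c ∈ idxs.
def tf (idxs : PySem.Set Int) : List Char → Int → List Char
  | [], _ => []
  | ch :: t, c =>
    if ch = '0' then (if idxs.contains c then '1' else ch) :: tf idxs t (c + 1)
    else ch :: tf idxs t c

theorem tf_length (idxs : PySem.Set Int) (l : List Char) (c : Int) :
    (tf idxs l c).length = l.length := by
  induction l generalizing c with
  | nil => rfl
  | cons ch t ih => simp only [tf]; split_ifs <;> simp [ih]

theorem set_append_len (pre : List Char) (x v : Char) (t : List Char) :
    (pre ++ x :: t).set pre.length v = pre ++ v :: t := by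
  induction pre with
  | nil => rfl
  | cons a pre ih => simp [ih]

theorem foldA (idxs : PySem.Set Int) (t pre : List Char) (c : Int) :
    ((PySem.List.enumerate t ((pre.length : Nat) : Int)).foldl
      (fun (st : List Char × Int) (p : Int × Char) =>
        if p.2 = '0' then
          ((if idxs.contains st.2 then PySem.List.pySetD st.1 p.1 '1' else st.1), st.2 + 1)
        else st)
      (pre ++ t, c)).1 = pre ++ tf idxs t c := by
  induction t generalizing pre c with
  | nil => simp [PySem.List.enumerate_nil, tf]
  | cons ch t ih =>
    rw [PySem.List.enumerate_cons, List.foldl_cons]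
    have hcast : ((pre.length : Nat) : Int) + 1 = (((pre.length + 1 : Nat)) : Int) := by
      push_cast; ring
    by_cases h0 : ch = '0'
    · subst h0
      cases hc : idxs.contains c with
      | true =>
        have hset : PySem.List.pySetD (pre ++ '0' :: t) ((pre.length : Nat) : Int) '1'
            = pre ++ '1' :: t := by
          rw [PySem.List.pySetD_natCast, set_append_len]
        simp only [reduceIte, hc, if_true, hset]
        have h := ih (pre ++ ['1']) (c + 1)
        simp only [List.length_append, List.length_cons, List.length_nil, Nat.zero_add,
          List.append_assoc, List.cons_append, List.nil_append] at h
        rw [hcast, h]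
        have hm : c ∈ idxs := by simpa [pysem] using hc
        simp [tf, hm]
      | false =>
        simp only [reduceIte, hc, Bool.false_eq_true, if_false]
        have h := ih (pre ++ ['0']) (c + 1)
        simp only [List.length_append, List.length_cons, List.length_nil, Nat.zero_add,
          List.append_assoc, List.cons_append, List.nil_append] at h
        rw [hcast, h]
        have hm : c ∉ idxs := by simpa [pysem] using hc
        simp [tf, hm]
    · simp only [h0, if_false]
      have h := ih (pre ++ [ch]) c
      simp only [List.length_append, List.length_cons, List.length_nil, Nat.zero_add,
        List.append_assoc, List.cons_append, List.nil_append] at h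
      rw [hcast, h]
      simp [tf, h0]

theorem tf_getElem (idxs : PySem.Set Int) (l : List Char) (c : Int) (k : Nat)
    (hk : k < l.length) :
    (tf idxs l c)[k]'(by rw [tf_length]; exact hk) =
      if l[k] = '0' ∧ idxs.contains (c + (((l.take k).count '0' : Nat) : Int)) then '1'
      else l[k] := by
  induction l generalizing c k with
  | nil => simp at hk
  | cons ch t ih =>
    cases k with
    | zero =>
      simp only [List.take_zero, List.count_nil, Nat.cast_zero, add_zero, List.getElem_cons_zero]
      by_cases h0 : ch = '0'
      · by_cases hc : idxs.contains c <;> simp [tf, h0, hc]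
      · simp [tf, h0]
    | succ k =>
      have hk' : k < t.length := by simpa using hk
      by_cases h0 : ch = '0'
      · have heq : (tf idxs (ch :: t) c)[k + 1]'(by rw [tf_length]; exact hk)
            = (tf idxs t (c + 1))[k]'(by rw [tf_length]; exact hk') := by
          simp [tf, h0]
        rw [heq, ih (c + 1) k hk']
        have hcnt : ((ch :: t).take (k + 1)).count '0' = (t.take k).count '0' + 1 := by
          simp [List.take_succ_cons, List.count_cons, h0]
        have hc2 : (c + 1) + (((t.take k).count '0' : Nat) : Int)
            = c + ((((t.take k).count '0' + 1 : Nat)) : Int) := by push_cast; ring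
        simp only [List.getElem_cons_succ, hcnt, hc2]
      · have heq : (tf idxs (ch :: t) c)[k + 1]'(by rw [tf_length]; exact hk)
            = (tf idxs t c)[k]'(by rw [tf_length]; exact hk') := by
          simp [tf, h0]
        rw [heq, ih c k hk']
        have hcnt : ((ch :: t).take (k + 1)).count '0' = (t.take k).count '0' := by
          simp [List.take_succ_cons, List.count_cons, h0]
        simp only [List.getElem_cons_succ, hcnt]

-- Source B's zeros list, named for the proofs (definitionally the port's expression)
def zsOf (chars : List Char) (s : Int) : List Int :=
  ((PySem.List.enumerate chars s).filter (fun p => p.2 == '0')).map (fun p => p.1)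

theorem zsOf_cons (ch : Char) (t : List Char) (s : Int) :
    zsOf (ch :: t) s = if ch = '0' then s :: zsOf t (s + 1) else zsOf t (s + 1) := by
  simp only [zsOf, PySem.List.enumerate_cons, List.filter_cons]
  split_ifs with h <;> simp_all

theorem zsOf_spec (t : List Char) (s : Int) (j : Nat) (hj : j < (zsOf t s).length) :
    ∃ k : Nat, ∃ hk : k < t.length, (zsOf t s)[j] = s + k ∧ t[k] = '0' ∧
      (t.take k).count '0' = j := by
  induction t generalizing s j with
  | nil => simp [zsOf, PySem.List.enumerate_nil] at hj
  | cons ch t ih =>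
    by_cases h : ch = '0'
    · cases j with
      | zero =>
        exact ⟨0, by simp, by simp [zsOf_cons, h], by simp [h], by simp⟩
      | succ j =>
        have hj' : j < (zsOf t (s + 1)).length := by
          have h2 := hj; rw [zsOf_cons, if_pos h] at h2; simpa using h2
        obtain ⟨k, hk, hget, h0, hcnt⟩ := ih (s + 1) j hj'
        refine ⟨k + 1, by simpa using hk, ?_, by simpa using h0, ?_⟩
        · simp only [zsOf_cons, if_pos h, List.getElem_cons_succ, hget]; push_cast; ring
        · simp [List.take_succ_cons, List.count_cons, h, hcnt]
    · have hj' : j < (zsOf t (s + 1)).length := by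
        have h2 := hj; rw [zsOf_cons, if_neg h] at h2; exact h2
      obtain ⟨k, hk, hget, h0, hcnt⟩ := ih (s + 1) j hj'
      refine ⟨k + 1, by simpa using hk, ?_, by simpa using h0, ?_⟩
      · simp only [zsOf_cons, if_neg h, hget]; push_cast; ring
      · simp [List.take_succ_cons, List.count_cons, h, hcnt]

theorem zsOf_of_zero (t : List Char) (s : Int) (k : Nat) (hk : k < t.length)
    (h0 : t[k] = '0') :
    ∃ hj : (t.take k).count '0' < (zsOf t s).length,
      (zsOf t s)[(t.take k).count '0'] = s + k := by
  induction t generalizing s k with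
  | nil => simp at hk
  | cons ch t ih =>
    cases k with
    | zero =>
      have h : ch = '0' := by simpa using h0
      refine ⟨by rw [zsOf_cons, if_pos h]; simp, ?_⟩
      simp [zsOf_cons, h]
    | succ k =>
      have hk' : k < t.length := by simpa using hk
      have h0' : t[k] = '0' := by simpa using h0
      obtain ⟨hj, hget⟩ := ih (s + 1) k hk' h0'
      by_cases h : ch = '0'
      · have hcnt : ((ch :: t).take (k + 1)).count '0' = (t.take k).count '0' + 1 := by
          simp [List.take_succ_cons, List.count_cons, h]
        refine ⟨by rw [hcnt, zsOf_cons, if_pos h, List.length_cons]; omega, ?_⟩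
        simp only [zsOf_cons, if_pos h, hcnt, List.getElem_cons_succ, hget]; push_cast; ring
      · have hcnt : ((ch :: t).take (k + 1)).count '0' = (t.take k).count '0' := by
          simp [List.take_succ_cons, List.count_cons, h]
        refine ⟨by rw [hcnt, zsOf_cons, if_neg h]; exact hj, ?_⟩
        simp only [zsOf_cons, if_neg h, hcnt, hget]; push_cast; ring

theorem pyGetD_nonneg (zs : List Int) (o : Int) (hz : ∀ x ∈ zs, 0 ≤ x) :
    0 ≤ PySem.List.pyGetD zs o 0 := by
  by_cases hr : PySem.Raise.InRange zs.length o
  · exact hz _ (PySem.List.pyGetD_mem zs 0 hr)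
  · rw [PySem.List.pyGetD_of_none zs o 0 ((PySem.List.pyGet?_eq_none_iff zs o).2 hr)]

theorem altMark_length (size : Int) (zs : List Int) (chars : List Char) (i : Int) :
    (altMark size zs chars i).length = chars.length := by
  fun_induction altMark with
  | case1 chars i h1 h2 => rfl
  | case2 chars i h1 h2 ih => rw [ih, PySem.List.length_pySetD]
  | case3 chars i h1 => rfl

-- the loop only ever writes '1'
theorem altMark_get_or (size : Int) (zs : List Int) (chars : List Char) (i : Int)
    (p : Nat) (hz : ∀ x ∈ zs, 0 ≤ x) :
    (altMark size zs chars i)[p]? = some '1' ∨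
      (altMark size zs chars i)[p]? = chars[p]? := by
  fun_induction altMark with
  | case1 chars i h1 h2 => right; rfl
  | case2 chars i h1 h2 ih =>
    rcases ih with h | h
    · left; exact h
    · rw [h]
      have h0q : 0 ≤ PySem.List.pyGetD zs (i * (size + 1)) 0 := pyGetD_nonneg zs _ hz
      rw [PySem.List.pySetD_of_nonneg chars '1' h0q]
      by_cases hqp : (PySem.List.pyGetD zs (i * (size + 1)) 0).toNat = p
      · rw [← hqp, List.getElem?_set_self']
        by_cases hlt : (PySem.List.pyGetD zs (i * (size + 1)) 0).toNat < chars.length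
        · left
          rw [List.getElem?_eq_getElem hlt]; rfl
        · right
          rw [List.getElem?_eq_none_iff.2 (by omega)]; rfl
      · right; rw [List.getElem?_set_ne hqp]
  | case3 chars i h1 => right; rfl

-- the loop never touches position p when no remaining diagonal rank maps to p
theorem altMark_keep (size : Int) (zs : List Int) (chars : List Char) (i : Int)
    (p : Nat) (hz : ∀ x ∈ zs, 0 ≤ x) :
    (¬ ∃ q : Int, i ≤ q ∧ q < size ∧ q * (size + 1) < (zs.length : Int) ∧
      zs[(q * (size + 1)).toNat]? = some (p : Int)) →
    0 ≤ i → (altMark size zs chars i)[p]? = chars[p]? := by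
  fun_induction altMark with
  | case1 chars i h1 h2 => intro _ _; rfl
  | case2 chars i h1 h2 ih =>
    intro hno hi
    push_neg at h2
    set o : Int := i * (size + 1) with ho
    have ho0 : (0:Int) ≤ o := mul_nonneg hi (by omega)
    have hoN : o.toNat < zs.length := by omega
    have hqv : PySem.List.pyGetD zs o 0 = zs[o.toNat]'hoN :=
      PySem.List.pyGetD_eq_getElem zs 0 ho0 (by omega)
    have hnp : zs[o.toNat]'hoN ≠ (p : Int) := by
      intro hc
      exact hno ⟨i, le_refl i, h1, by omega, by rw [List.getElem?_eq_getElem hoN]; simp [hc]⟩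
    have hno' : ¬ ∃ q : Int, i + 1 ≤ q ∧ q < size ∧ q * (size + 1) < (zs.length : Int) ∧
        zs[(q * (size + 1)).toNat]? = some (p : Int) := by
      rintro ⟨q, hq1, hq2, hq3, hq4⟩
      exact hno ⟨q, by omega, hq2, hq3, hq4⟩
    rw [ih hno' (by omega)]
    rw [hqv, PySem.List.pySetD_of_nonneg chars '1' (hz _ (List.getElem_mem hoN))]
    have : (zs[o.toNat]'hoN).toNat ≠ p := by
      intro hc
      apply hnp
      have := hz _ (List.getElem_mem hoN)
      omega
    rw [List.getElem?_set_ne this]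
  | case3 chars i h1 => intro _ _; rfl

-- when some remaining diagonal rank maps to p the loop writes '1' there
theorem altMark_one (size : Int) (zs : List Int) (chars : List Char) (i : Int)
    (p : Nat) (n : Nat) (hz : ∀ x ∈ zs, 0 ≤ x ∧ x < (n : Int)) :
    (∃ q : Int, i ≤ q ∧ q < size ∧ q * (size + 1) < (zs.length : Int) ∧
      zs[(q * (size + 1)).toNat]? = some (p : Int)) →
    0 ≤ i → chars.length = n → (altMark size zs chars i)[p]? = some '1' := by
  fun_induction altMark with
  | case1 chars i h1 h2 =>
    rintro ⟨q, hq1, hq2, hq3, hq4⟩ hi hlen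
    have hm : i * (size + 1) ≤ q * (size + 1) :=
      mul_le_mul_of_nonneg_right hq1 (by omega)
    linarith
  | case2 chars i h1 h2 ih =>
    rintro ⟨q, hq1, hq2, hq3, hq4⟩ hi hlen
    by_cases hnext : ∃ q : Int, i + 1 ≤ q ∧ q < size ∧ q * (size + 1) < (zs.length : Int) ∧
        zs[(q * (size + 1)).toNat]? = some (p : Int)
    · exact ih hnext (by omega) (by rw [PySem.List.length_pySetD]; exact hlen)
    · have hqi : q = i := by
        by_contra hne
        exact hnext ⟨q, by omega, hq2, hq3, hq4⟩
      subst hqi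
      push_neg at h2
      set o : Int := q * (size + 1) with ho
      have ho0 : (0:Int) ≤ o := mul_nonneg hi (by omega)
      have hoN : o.toNat < zs.length := by omega
      have hqv : PySem.List.pyGetD zs o 0 = zs[o.toNat]'hoN :=
        PySem.List.pyGetD_eq_getElem zs 0 ho0 (by omega)
      have hzp : zs[o.toNat]'hoN = (p : Int) := by
        rw [List.getElem?_eq_getElem hoN] at hq4
        exact Option.some_injective _ hq4
      have hbnd := hz _ (List.getElem_mem hoN)
      have hpn : p < n := by omega
      have hset : PySem.List.pySetD chars (PySem.List.pyGetD zs o 0) '1'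
          = chars.set p '1' := by
        rw [hqv, PySem.List.pySetD_of_nonneg chars '1' hbnd.1, hzp]
        simp
      rw [hset]
      rcases altMark_get_or size zs (chars.set p '1') (q + 1) p (fun x hx => (hz x hx).1)
        with h | h
      · exact h
      · rw [h, List.getElem?_set_self', List.getElem?_eq_getElem (by omega)]
        rfl
  | case3 chars i h1 =>
    rintro ⟨q, hq1, hq2, _, _⟩ hi _
    omega

theorem contains_diag_iff (size : Int) (x : Int) :
    ((PySem.Set.ofList ((PySem.List.pyRange 0 size 1).map
        (fun i => i * size + i))).contains x = true)
      ↔ ∃ q : Int, 0 ≤ q ∧ q < size ∧ x = q * size + q := by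
  constructor
  · intro h
    have hx : x ∈ (PySem.List.pyRange 0 size 1).map (fun i => i * size + i) := by
      simpa [pysem] using h
    obtain ⟨q, hq, hval⟩ := List.mem_map.1 hx
    rw [PySem.List.mem_pyRange_one] at hq
    exact ⟨q, hq.1, hq.2, hval.symm⟩
  · rintro ⟨q, hq1, hq2, hval⟩
    have hx : x ∈ (PySem.List.pyRange 0 size 1).map (fun i => i * size + i) :=
      List.mem_map.2 ⟨q, PySem.List.mem_pyRange_one.2 ⟨hq1, hq2⟩, hval.symm⟩
    simpa [pysem] using hx

theorem zsOf_bounds (chars : List Char) (x : Int) (hx : x ∈ zsOf chars 0) :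
    0 ≤ x ∧ x < (chars.length : Int) := by
  obtain ⟨j, hj, hget⟩ := List.mem_iff_getElem.1 hx
  obtain ⟨k, hk, hval, _, _⟩ := zsOf_spec chars 0 j hj
  rw [← hget, hval]
  constructor <;> omega

theorem main_eq (chars : List Char) (size : Int) :
    tf (PySem.Set.ofList ((PySem.List.pyRange 0 size 1).map (fun i => i * size + i)))
        chars 0
      = altMark size (zsOf chars 0) chars 0 := by
  set idxs := PySem.Set.ofList ((PySem.List.pyRange 0 size 1).map (fun i => i * size + i))
    with hidxs
  set zs := zsOf chars 0 with hzs
  have hz : ∀ x ∈ zs, 0 ≤ x ∧ x < (chars.length : Int) := fun x hx => zsOf_bounds chars x hx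
  apply List.ext_getElem
  · rw [tf_length, altMark_length]
  · intro p hp1 hp2
    have hpc : p < chars.length := by rw [tf_length] at hp1; exact hp1
    rw [tf_getElem idxs chars 0 p hpc]
    by_cases hcond : chars[p] = '0' ∧
        idxs.contains (0 + (((chars.take p).count '0' : Nat) : Int)) = true
    · rw [if_pos hcond]
      have hc2 : idxs.contains ((((chars.take p).count '0' : Nat)) : Int) = true := by
        have h := hcond.2; rwa [zero_add] at h
      obtain ⟨q, hq0, hqs, hval⟩ := (contains_diag_iff size _).1 hc2
      obtain ⟨hjlt, hjget⟩ := zsOf_of_zero chars 0 p hpc hcond.1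
      have hvq : (((chars.take p).count '0' : Nat) : Int) = q * (size + 1) := by
        rw [hval]; ring
      have hq3 : q * (size + 1) < (zs.length : Int) := by
        rw [← hvq]
        exact_mod_cast hjlt
      have htn : (q * (size + 1)).toNat = (chars.take p).count '0' := by
        rw [← hvq]; simp
      have hq4 : zs[(q * (size + 1)).toNat]? = some (p : Int) := by
        rw [htn, List.getElem?_eq_getElem hjlt, hjget]
        simp
      have hone := altMark_one size zs chars 0 p chars.length hz
        ⟨q, hq0, hqs, hq3, hq4⟩ le_rfl rfl
      rw [List.getElem?_eq_getElem hp2] at hone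
      exact (Option.some_injective _ hone).symm
    · rw [if_neg hcond]
      have hno : ¬ ∃ q : Int, (0:Int) ≤ q ∧ q < size ∧ q * (size + 1) < (zs.length : Int) ∧
          zs[(q * (size + 1)).toNat]? = some (p : Int) := by
        rintro ⟨q, hq0, hqs, hq3, hq4⟩
        set o : Int := q * (size + 1) with ho
        have ho0 : (0:Int) ≤ o := mul_nonneg hq0 (by omega)
        have hoN : o.toNat < zs.length := by omega
        rw [List.getElem?_eq_getElem hoN] at hq4
        have hzp : zs[o.toNat]'hoN = (p : Int) := Option.some_injective _ hq4
        obtain ⟨k, hk, hval, hzero, hcnt⟩ := zsOf_spec chars 0 o.toNat hoN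
        have hkp : k = p := by
          rw [hval] at hzp
          omega
        subst hkp
        apply hcond
        refine ⟨hzero, ?_⟩
        rw [zero_add]
        apply (contains_diag_iff size _).2
        refine ⟨q, hq0, hqs, ?_⟩
        rw [hcnt, Int.toNat_of_nonneg ho0, ho]
        ring
      have hkeep := altMark_keep size zs chars 0 p (fun x hx => (hz x hx).1) hno le_rfl
      rw [List.getElem?_eq_getElem hp2, List.getElem?_eq_getElem hpc] at hkeep
      exact (Option.some_injective _ hkeep).symm

-- ===== VERDICT (by name: the statement is the Claim_ definition above) =====
theorem eye_to_diagonal_spec : Claim_equal_eye_to_diagonal := by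
  intro eye size _
  unfold Spec_eye_to_diagonal
  simp only [eye_to_diagonal, eye_to_diagonal_alt]
  have hA := foldA
    (PySem.Set.ofList ((PySem.List.pyRange 0 size 1).map (fun i => i * size + i)))
    eye.toList [] 0
  simp only [List.length_nil, Nat.cast_zero, List.nil_append] at hA
  rw [hA]
  have hzs : ((PySem.List.enumerate eye.toList 0).filter (fun p => p.2 == '0')).map
      (fun p => p.1) = zsOf eye.toList 0 := rfl
  rw [hzs, main_eq]
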